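-- pv_equiv track=rewrite | github.com/Arnab-arp/Python-Projects | Searching algorithmns.py | front_back_search
-- ===== SOURCE A (Python) =====
-- def front_back_search(elements: list, target):
--     front = 0
--     back = len(elements) - 1
--     for _ in elements:
--         if elements[front] == target:
--             return f"Element: {target} Index: {front}"
--         elif elements[back] == target:
--             return f"Element: {target} Index: {back}"
--         front += 1
--         back -= 1
-- ===== SOURCE B (Python) =====
-- def front_back_search(elements: list, target):
--     n = len(elements)
--     f = None
--     for i, x in enumerate(elements):
--         if x == target:
--             f = i
--             break
--     if f is None:
--         return None
--     for j, x in enumerate(reversed(elements)):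
--         if x == target:
--             l = n - 1 - j
--             break
--     if f <= n - 1 - l:
--         return f"Element: {target} Index: {f}"
--     return f"Element: {target} Index: {l}"
-- ===== Notes on version B (the rewrite author's own statement) =====
-- stated objective: alternative
-- what changed: Replaces A's single interleaved two-pointer loop by two independent directional scans (first match from the front, first match from the back) followed by index arithmetic that decides which end's match A's interleaving would have reached first.
import Mathlib
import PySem

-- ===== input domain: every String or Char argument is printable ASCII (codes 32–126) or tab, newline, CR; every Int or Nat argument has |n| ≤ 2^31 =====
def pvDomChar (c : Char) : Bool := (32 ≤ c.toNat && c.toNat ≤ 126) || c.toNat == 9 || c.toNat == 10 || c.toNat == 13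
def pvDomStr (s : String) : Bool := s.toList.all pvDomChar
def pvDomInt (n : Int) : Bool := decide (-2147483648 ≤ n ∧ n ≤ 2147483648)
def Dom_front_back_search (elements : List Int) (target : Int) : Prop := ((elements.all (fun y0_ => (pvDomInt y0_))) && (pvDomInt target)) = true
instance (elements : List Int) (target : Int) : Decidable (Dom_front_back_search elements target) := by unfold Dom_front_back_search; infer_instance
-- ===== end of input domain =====

-- B replaces the interleaved two-pointer pass by two independent directional scans plus
-- index arithmetic that picks the match A's interleaving reaches first (objective: alternative).

-- ===== PORT A =====
-- the 'for _ in elements' loop: fuel = number of remaining iterations, state (front, back)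
def fbsLoop (elements : List Int) (target : Int) : Nat → Int → Int → Option String
  | 0, _, _ => none
  | k + 1, front, back =>
    if PySem.List.pyGet? elements front = some target then
      some ("Element: " ++ PySem.Int.toStr target ++ " Index: " ++ PySem.Int.toStr front)
    else if PySem.List.pyGet? elements back = some target then
      some ("Element: " ++ PySem.Int.toStr target ++ " Index: " ++ PySem.Int.toStr back)
    else fbsLoop elements target k (front + 1) (back - 1)

def front_back_search (elements : List Int) (target : Int) : Option String :=
  fbsLoop elements target elements.length 0 ((elements.length : Int) - 1)

-- ===== PORT B =====
-- forward scan with '==': index of the first match (the 'for i, x in enumerate(...)' loops)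
def findFirst (xs : List Int) (target : Int) (i : Nat) : Option Nat :=
  match xs with
  | [] => none
  | x :: rest => if x = target then some i else findFirst rest target (i + 1)

def front_back_search_alt (elements : List Int) (target : Int) : Option String :=
  match findFirst elements target 0 with
  | none => none
  | some f =>
    match findFirst elements.reverse target 0 with
    | none => none  -- unreachable: a forward match implies a backward match
    | some j =>
      if (f : Int) ≤ (elements.length : Int) - 1 - ((elements.length : Int) - 1 - (j : Int)) then
        some ("Element: " ++ PySem.Int.toStr target ++ " Index: " ++ PySem.Int.toStr (f : Int))
      else
        some ("Element: " ++ PySem.Int.toStr target ++ " Index: " ++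
          PySem.Int.toStr ((elements.length : Int) - 1 - (j : Int)))

-- ===== PRECONDITION & SPEC =====
def Spec_front_back_search (elements : List Int) (target : Int) (out : Option String) : Prop := out = front_back_search_alt elements target
instance (elements : List Int) (target : Int) (out : Option String) : Decidable (Spec_front_back_search elements target out) := by unfold Spec_front_back_search; infer_instance

-- ===== CLAIM (what is proved, stated in full; the proofs are below) =====
def Claim_equal_front_back_search : Prop := ∀ (elements : List Int) (target : Int), Dom_front_back_search elements target → Spec_front_back_search elements target (front_back_search elements target)

-- ===== LEMMAS AND PROOFS =====

theorem findFirst_none {xs : List Int} {t : Int} {i : Nat} :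
    findFirst xs t i = none ↔ ∀ x ∈ xs, x ≠ t := by
  induction xs generalizing i with
  | nil => simp [findFirst]
  | cons x rest ih =>
    by_cases h : x = t
    · simp [findFirst, h]
    · simp [findFirst, h, ih]

theorem findFirst_some {xs : List Int} {t : Int} {i f : Nat} :
    findFirst xs t i = some f →
    i ≤ f ∧ f - i < xs.length ∧ xs[f - i]? = some t ∧ ∀ k, i ≤ k → k < f → xs[k - i]? ≠ some t := by
  induction xs generalizing i with
  | nil => simp [findFirst]
  | cons x rest ih =>
    intro hfind
    simp only [findFirst] at hfind
    by_cases h : x = t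
    · rw [if_pos h] at hfind
      cases hfind
      refine ⟨le_refl _, by simp, by simp [h], ?_⟩
      intro k hk1 hk2
      exact absurd hk2 (by omega)
    · rw [if_neg h] at hfind
      obtain ⟨h1, h2, h3, h4⟩ := ih hfind
      refine ⟨by omega, by simp; omega, ?_, ?_⟩
      · rw [show f - i = (f - (i + 1)) + 1 by omega]; simpa using h3
      · intro k hk1 hk2
        rcases Nat.eq_or_lt_of_le hk1 with rfl | hlt
        · simpa [Nat.sub_self] using h
        · rw [show k - i = (k - (i + 1)) + 1 by omega]
          simpa using h4 k hlt hk2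

-- f is the index of the first match
theorem first_facts {xs : List Int} {t : Int} {f : Nat} (h : findFirst xs t 0 = some f) :
    f < xs.length ∧ xs[f]? = some t ∧ ∀ k, k < f → xs[k]? ≠ some t := by
  obtain ⟨_, h2, h3, h4⟩ := findFirst_some h
  exact ⟨by simpa using h2, by simpa using h3, fun k hk => by simpa using h4 k (Nat.zero_le _) hk⟩

-- n-1-j is the index of the last match
theorem last_facts {xs : List Int} {t : Int} {j : Nat} (h : findFirst xs.reverse t 0 = some j) :
    j < xs.length ∧ xs[xs.length - 1 - j]? = some t ∧
      ∀ m, m < xs.length → xs.length - 1 - j < m → xs[m]? ≠ some t := by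
  obtain ⟨hj, hg, hmin⟩ := first_facts h
  rw [List.length_reverse] at hj
  have hrev : ∀ k, k < xs.length → xs.reverse[k]? = xs[xs.length - 1 - k]? := by
    intro k hk
    exact List.getElem?_reverse hk
  rw [hrev j hj] at hg
  refine ⟨hj, hg, ?_⟩
  intro m hm hgt hcon
  have hj' : xs.length - 1 - m < j := by omega
  have hne := hmin _ hj'
  rw [hrev _ (by omega)] at hne
  rw [show xs.length - 1 - (xs.length - 1 - m) = m by omega] at hne
  exact hne hcon

-- no-match case: the loop exhausts its fuel
theorem loop_none {xs : List Int} {t : Int} (hno : ∀ x ∈ xs, x ≠ t) :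
    ∀ k fr bk, fbsLoop xs t k fr bk = none := by
  intro k
  induction k with
  | zero => intro fr bk; rfl
  | succ k ih =>
    intro fr bk
    have hf : PySem.List.pyGet? xs fr ≠ some t := fun h =>
      hno t (PySem.List.mem_of_pyGet?_eq_some xs h) rfl
    have hb : PySem.List.pyGet? xs bk ≠ some t := fun h =>
      hno t (PySem.List.mem_of_pyGet?_eq_some xs h) rfl
    simp only [fbsLoop, if_neg hf, if_neg hb]
    exact ih _ _

-- match case invariant: after n - k iterations, front = n - k, back = n - 1 - front;
-- no match strictly before front and none strictly after back
theorem loop_found {xs : List Int} {t : Int} {f l : Nat}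
    (hf : xs[f]? = some t) (hfmin : ∀ k, k < f → xs[k]? ≠ some t)
    (hl : xs[l]? = some t) (hlmax : ∀ m, m < xs.length → l < m → xs[m]? ≠ some t) :
    ∀ k fr, fr + k = xs.length → fr ≤ f → l + fr + 1 ≤ xs.length →
      fbsLoop xs t k (fr : Int) ((xs.length : Int) - 1 - fr) =
        (if (f : Int) ≤ (xs.length : Int) - 1 - l then
          some ("Element: " ++ PySem.Int.toStr t ++ " Index: " ++ PySem.Int.toStr (f : Int))
        else
          some ("Element: " ++ PySem.Int.toStr t ++ " Index: " ++ PySem.Int.toStr (l : Int))) := by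
  have hfn : f < xs.length := by
    by_contra hc
    rw [List.getElem?_eq_none (by omega)] at hf
    simp at hf
  intro k
  induction k with
  | zero => intro fr h1 h2 h3; omega
  | succ k ih =>
    intro fr h1 h2 h3
    have hbk : ((xs.length : Int) - 1 - fr) = ((xs.length - 1 - fr : Nat) : Int) := by
      omega
    simp only [fbsLoop, hbk, PySem.List.pyGet?_natCast]
    by_cases hfront : xs[fr]? = some t
    · have hfe : fr = f := by
        by_contra hne
        exact hfmin fr (by omega) hfront
      rw [if_pos hfront, hfe, if_pos (by omega)]
    · rw [if_neg hfront]
      have hfrf : fr < f := by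
        rcases Nat.eq_or_lt_of_le h2 with rfl | hh
        · exact absurd hf hfront
        · exact hh
      by_cases hback : xs[xs.length - 1 - fr]? = some t
      · have hle : l = xs.length - 1 - fr := by
          by_contra hne
          rcases Nat.lt_trichotomy l (xs.length - 1 - fr) with hh | hh | hh
          · exact hlmax _ (by omega) hh hback
          · exact hne hh
          · exact hlmax l (by omega) (by omega) hl
        rw [if_pos hback, if_neg (by omega), hle]
      · rw [if_neg hback]
        have hlb : l < xs.length - 1 - fr := by
          rcases Nat.lt_trichotomy l (xs.length - 1 - fr) with hh | hh | hh
          · exact hh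
          · exact absurd (hh ▸ hl) hback
          · exact absurd hl (hlmax l (by omega) (by omega))
        have e1 : ((fr : Int) + 1) = ((fr + 1 : Nat) : Int) := by push_cast; ring
        have e2 : ((xs.length - 1 - fr : Nat) : Int) - 1 = (xs.length : Int) - 1 - ((fr + 1 : Nat) : Int) := by
          omega
        rw [e1, e2]
        exact ih (fr + 1) (by omega) (by omega) (by omega)

-- ===== VERDICT (by name: the statement is the Claim_ definition above) =====
theorem front_back_search_spec : Claim_equal_front_back_search := by
  intro elements target _
  unfold Spec_front_back_search
  cases hF : findFirst elements target 0 with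
  | none =>
    simp only [front_back_search, front_back_search_alt, hF]
    exact loop_none (findFirst_none.mp hF) _ _ _
  | some f =>
    obtain ⟨hfn, hf, hfmin⟩ := first_facts hF
    cases hR : findFirst elements.reverse target 0 with
    | none =>
      exfalso
      refine findFirst_none.mp hR target ?_ rfl
      rw [List.mem_reverse]
      exact PySem.List.mem_of_pyGet?_eq_some elements (i := (f : Int))
        (by rw [PySem.List.pyGet?_natCast]; exact hf)
    | some j =>
      obtain ⟨hj, hl, hlmax⟩ := last_facts hR
      have key := loop_found hf hfmin hl hlmax elements.length 0 (by omega) (by omega) (by omega)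
      simp only [front_back_search, front_back_search_alt, hF, hR]
      rw [show ((0 : Nat) : Int) = 0 from rfl, sub_zero] at key
      rw [key, show ((elements.length - 1 - j : Nat) : Int) = (elements.length : Int) - 1 - (j : Int) from by omega]
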